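-- pv_equiv track=rewrite | github.com/SebastianDevps/agent007 | hooks/tool-loop-detection.py | detect_ping_pong
-- ===== SOURCE A (Python) =====
-- PING_PONG_THRESHOLD = 6  # 3 full alternations
--
-- def detect_ping_pong(window: list) -> bool:
--     """Detect alternation between exactly 2 different hashes."""
--     if len(window) < PING_PONG_THRESHOLD:
--         return False
--     recent = [e["hash"] for e in window[-PING_PONG_THRESHOLD:]]
--     unique = set(recent)
--     if len(unique) != 2:
--         return False
--     # Check true alternation: A B A B A B
--     return all(recent[i] != recent[i + 1] for i in range(len(recent) - 1))
-- ===== SOURCE B (Python) =====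
-- PING_PONG_THRESHOLD = 6  # 3 full alternations
--
-- def detect_ping_pong(window: list) -> bool:
--     """Detect alternation between exactly 2 different hashes."""
--     if len(window) < PING_PONG_THRESHOLD:
--         return False
--     recent = [e["hash"] for e in window[-PING_PONG_THRESHOLD:]]
--     expected = [recent[0], recent[1]] * (PING_PONG_THRESHOLD // 2)
--     return recent[0] != recent[1] and recent == expected
-- ===== Notes on version B (the rewrite author's own statement) =====
-- stated objective: simpler
-- what changed: Replaces A's set-cardinality test plus pairwise adjacent-inequality scan with a single comparison of the 6-hash window against the explicit expected alternating pattern [a,b]*3 (plus a != b).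
import Mathlib
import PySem

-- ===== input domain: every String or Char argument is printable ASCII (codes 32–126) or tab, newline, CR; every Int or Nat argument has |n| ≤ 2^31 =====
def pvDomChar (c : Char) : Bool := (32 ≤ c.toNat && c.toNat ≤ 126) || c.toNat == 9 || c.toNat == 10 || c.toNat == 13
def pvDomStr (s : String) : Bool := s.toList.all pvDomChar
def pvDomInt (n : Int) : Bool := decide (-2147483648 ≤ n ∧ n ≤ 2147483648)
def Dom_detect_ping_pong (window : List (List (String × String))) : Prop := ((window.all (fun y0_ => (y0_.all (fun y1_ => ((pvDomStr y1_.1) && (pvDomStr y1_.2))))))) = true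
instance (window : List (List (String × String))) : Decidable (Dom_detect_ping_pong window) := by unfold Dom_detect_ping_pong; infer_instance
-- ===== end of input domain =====

-- B replaces A's set-cardinality test plus pairwise adjacent scan by one comparison of the
-- 6-hash window against the explicit expected pattern [a,b]*3 (objective: simpler).

-- ===== PORT A =====
-- e["hash"] always hits a key inside Pre_; the port totalises the Option lookup with getD "" (exact inside Pre_)
def detect_ping_pong (window : List (List (String × String))) : Bool :=
  if window.length < 6 then false
  else
    let recent := (PySem.List.slice window (some (-6)) none).map
      (fun e => ((PySem.Dict.mk e).get? "hash").getD "")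
    let unique : PySem.Set String := PySem.Set.ofList recent
    if unique.length ≠ 2 then false
    else
      (PySem.List.pyRange 0 ((recent.length : Int) - 1) 1).all
        (fun i => !((PySem.List.pyGet? recent i).getD "" == (PySem.List.pyGet? recent (i + 1)).getD ""))

-- ===== PORT B =====
def detect_ping_pong_alt (window : List (List (String × String))) : Bool :=
  if window.length < 6 then false
  else
    let recent := (PySem.List.slice window (some (-6)) none).map
      (fun e => ((PySem.Dict.mk e).get? "hash").getD "")
    let a := (PySem.List.pyGet? recent 0).getD ""
    let b := (PySem.List.pyGet? recent 1).getD ""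
    let expected := [a, b] ++ [a, b] ++ [a, b]   -- [recent[0], recent[1]] * (6 // 2)
    !(a == b) && (recent == expected)

-- ===== PRECONDITION & SPEC =====
-- Pre_ excludes windows of length ≥ 6 whose last 6 entries do not all carry a "hash" key: A (and B) raise KeyError there.
def Pre_detect_ping_pong (window : List (List (String × String))) : Prop :=
  window.length < 6 ∨
    (PySem.List.slice window (some (-6)) none).all (fun e => (PySem.Dict.mk e).contains "hash") = true
instance (window : List (List (String × String))) : Decidable (Pre_detect_ping_pong window) := by
  unfold Pre_detect_ping_pong; infer_instance
def pvWitness_detect_ping_pong : (List (List (String × String))) :=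
  [[("hash", "a")], [("hash", "b")], [("hash", "a")], [("hash", "b")], [("hash", "a")], [("hash", "b")]]
def Spec_detect_ping_pong (window : List (List (String × String))) (out : Bool) : Prop := out = detect_ping_pong_alt window
instance (window : List (List (String × String))) (out : Bool) : Decidable (Spec_detect_ping_pong window out) := by unfold Spec_detect_ping_pong; infer_instance

-- ===== CLAIM (what is proved, stated in full; the proofs are below) =====
def Claim_equal_detect_ping_pong : Prop := ∀ (window : List (List (String × String))), Dom_detect_ping_pong window → Pre_detect_ping_pong window → Spec_detect_ping_pong window (detect_ping_pong window)

-- ===== LEMMAS AND PROOFS =====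

-- every member of a 2-element nodup set that contains two distinct elements is one of them
lemma mem_two_set {s : List String} (hn : s.Nodup) (hl : s.length = 2)
    {x y z : String} (hx : x ∈ s) (hy : y ∈ s) (hxy : x ≠ y) (hz : z ∈ s) :
    z = x ∨ z = y := by
  match s, hl with
  | [u, v], _ =>
    simp only [List.mem_cons, List.not_mem_nil, or_false] at hx hy hz
    simp at hn
    rcases hx with rfl | rfl <;> rcases hy with rfl | rfl <;> tauto

lemma two_set_len {x0 x1 : String} (h : x0 ≠ x1) :
    (PySem.Set.ofList [x0, x1, x0, x1, x0, x1]).length = 2 := by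
  have hp : (PySem.Set.ofList [x0, x1, x0, x1, x0, x1]).Perm [x0, x1] := by
    rw [List.perm_ext_iff_of_nodup (PySem.Set.nodup_ofList _) (by simp [h])]
    intro a
    simp [PySem.Set.mem_ofList]
    tauto
  simpa using hp.length_eq

-- A's core test equals B's core test on any six hashes
lemma core_eq (x0 x1 x2 x3 x4 x5 : String) :
    (if (PySem.Set.ofList [x0, x1, x2, x3, x4, x5]).length ≠ 2 then false
     else
      (PySem.List.pyRange 0 (([x0, x1, x2, x3, x4, x5].length : Int) - 1) 1).all
        (fun i => !((PySem.List.pyGet? [x0, x1, x2, x3, x4, x5] i).getD "" ==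
                    (PySem.List.pyGet? [x0, x1, x2, x3, x4, x5] (i + 1)).getD ""))) =
    (!(x0 == x1) && ([x0, x1, x2, x3, x4, x5] == [x0, x1] ++ [x0, x1] ++ [x0, x1])) := by
  have h5 : ((([x0, x1, x2, x3, x4, x5].length : Int)) - 1) = 5 := by simp
  rw [h5, (by decide : PySem.List.pyRange 0 5 1 = [0, 1, 2, 3, 4])]
  rw [Bool.eq_iff_iff]
  simp [PySem.List.pyGet?, PySem.List.pyIdx?]
  constructor
  · rintro ⟨hlen, h01, h12, h23, h34, h45⟩
    have hn := PySem.Set.nodup_ofList (xs := [x0, x1, x2, x3, x4, x5])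
    have hx0 : x0 ∈ PySem.Set.ofList [x0, x1, x2, x3, x4, x5] := by simp [PySem.Set.mem_ofList]
    have hx1 : x1 ∈ PySem.Set.ofList [x0, x1, x2, x3, x4, x5] := by simp [PySem.Set.mem_ofList]
    have mem2 := fun z hz => mem_two_set hn hlen hx0 hx1 h01 (z := z) hz
    have h2 : x2 = x0 := by
      rcases mem2 x2 (by simp [PySem.Set.mem_ofList]) with h | h
      · exact h
      · exact absurd h.symm h12
    have h3 : x3 = x1 := by
      rcases mem2 x3 (by simp [PySem.Set.mem_ofList]) with h | h
      · exact absurd (h2.trans h.symm) h23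
      · exact h
    have h4 : x4 = x0 := by
      rcases mem2 x4 (by simp [PySem.Set.mem_ofList]) with h | h
      · exact h
      · exact absurd (h3.trans h.symm) h34
    have h5' : x5 = x1 := by
      rcases mem2 x5 (by simp [PySem.Set.mem_ofList]) with h | h
      · exact absurd (h4.trans h.symm) h45
      · exact h
    exact ⟨h01, h2, h3, h4, h5'⟩
  · rintro ⟨h01, rfl, rfl, rfl, rfl⟩
    exact ⟨two_set_len h01, h01, fun h => h01 h.symm, h01, fun h => h01 h.symm, h01⟩

-- ===== VERDICT (by name: the statement is the Claim_ definition above) =====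
theorem detect_ping_pong_spec : Claim_equal_detect_ping_pong := by
  intro window _ _
  unfold Spec_detect_ping_pong detect_ping_pong detect_ping_pong_alt
  by_cases hlt : window.length < 6
  · simp [hlt]
  · simp only [hlt, if_false]
    rw [PySem.List.slice_from_neg_ofNat window 6 (by omega)]
    obtain ⟨a, b, c, d, e, f, heq⟩ :
        ∃ a b c d e f, window.drop (window.length - 6) = [a, b, c, d, e, f] := by
      have hlen : (window.drop (window.length - 6)).length = 6 := by
        simp; omega
      rcases hdrop : window.drop (window.length - 6) with _|⟨a,_|⟨b,_|⟨c,_|⟨d,_|⟨e,_|⟨f,rest⟩⟩⟩⟩⟩⟩ <;>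
        rw [hdrop] at hlen <;> simp at hlen
      exact ⟨a, b, c, d, e, f, by simp [hlen]⟩
    rw [heq]
    simp only [List.map_cons, List.map_nil]
    have := core_eq (((PySem.Dict.mk a).get? "hash").getD "") (((PySem.Dict.mk b).get? "hash").getD "")
      (((PySem.Dict.mk c).get? "hash").getD "") (((PySem.Dict.mk d).get? "hash").getD "")
      (((PySem.Dict.mk e).get? "hash").getD "") (((PySem.Dict.mk f).get? "hash").getD "")
    simpa [PySem.List.pyGet?, PySem.List.pyIdx?] using this
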